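-- pv_equiv track=rewrite | github.com/walsh06/ootp_utils | ootp.py | combine_week_dicts
-- ===== SOURCE A (Python) =====
-- def combine_week_dicts(week_dicts, weeks):
--     combined_dict = {}
--     for week in range(1, weeks + 1):
--         for week_dict in week_dicts:
--             if week in week_dict:
--                 if week not in combined_dict:
--                     combined_dict[week] = []
--                 combined_dict[week].extend(week_dict[week])
--     return combined_dict
-- ===== SOURCE B (Python) =====
-- def combine_week_dicts(week_dicts, weeks):
--     combined = {}
--     for d in week_dicts:
--         for week, vals in d.items():
--             if 1 <= week <= weeks:
--                 combined.setdefault(week, []).extend(vals)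
--     return {w: combined[w] for w in sorted(combined)}
-- ===== Notes on version B (the rewrite author's own statement) =====
-- stated objective: faster
-- what changed: B makes one pass over the dict entries themselves, accumulating each in-range week's values with setdefault into a single index, then emits the keys in sorted order - there is no loop over the week range and no per-week scan of the dicts.
import Mathlib
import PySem

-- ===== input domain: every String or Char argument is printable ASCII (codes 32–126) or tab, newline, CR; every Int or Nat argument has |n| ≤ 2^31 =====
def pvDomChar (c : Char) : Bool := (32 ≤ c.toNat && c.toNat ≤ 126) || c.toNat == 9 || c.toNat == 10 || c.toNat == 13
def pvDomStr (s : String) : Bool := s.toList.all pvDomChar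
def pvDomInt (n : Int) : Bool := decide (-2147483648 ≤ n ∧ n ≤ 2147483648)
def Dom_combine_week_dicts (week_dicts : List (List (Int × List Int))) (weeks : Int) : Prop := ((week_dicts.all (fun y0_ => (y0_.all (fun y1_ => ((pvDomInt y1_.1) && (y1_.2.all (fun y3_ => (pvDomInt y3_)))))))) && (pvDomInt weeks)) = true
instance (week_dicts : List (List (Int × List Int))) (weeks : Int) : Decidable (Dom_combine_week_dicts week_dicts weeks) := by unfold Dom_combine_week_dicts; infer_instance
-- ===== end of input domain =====

-- B makes one pass over the dict entries themselves, accumulating each in-range week's values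
-- into a single index with setdefault, then emits the keys in sorted order; objective: faster
-- (no loop over the week range, no per-week scan of the dicts).

-- ===== PORT A =====
-- body of A's inner loop: 'for week_dict in week_dicts: if week in week_dict: …'
def pvAStep (week : Int) (combined : PySem.Dict Int (List Int)) (week_dict : List (Int × List Int)) :
    PySem.Dict Int (List Int) :=
  if (PySem.Dict.mk week_dict).contains week then
    (if combined.contains week then combined else combined.insert week []).modify week []
      (fun cur => cur ++ (PySem.Dict.mk week_dict).getD week [])
  else combined

def combine_week_dicts (week_dicts : List (List (Int × List Int))) (weeks : Int) : List (Int × List Int) :=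
  ((PySem.List.pyRange 1 (weeks + 1) 1).foldl
    (fun combined week => week_dicts.foldl (pvAStep week) combined)
    PySem.Dict.empty).items

-- ===== PORT B =====
-- d.items() for the association-list encoding of a Python dict: each key once, in first-occurrence
-- order, with the dict's (first-match) value — exact for any list that encodes a genuine dict.
def pvItems (d : List (Int × List Int)) : List (Int × List Int) :=
  (PySem.Set.ofList (d.map (·.1))).map (fun k => (k, (PySem.Dict.mk d).getD k []))

-- 'combined.setdefault(week, []).extend(vals)' is combined[week] = combined.get(week, []) + vals,
-- i.e. Dict.modify week [] (· ++ vals)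
def combine_week_dicts_alt (week_dicts : List (List (Int × List Int))) (weeks : Int) : List (Int × List Int) :=
  let combined := week_dicts.foldl (fun c d =>
      (pvItems d).foldl (fun c p =>
        if 1 ≤ p.1 ∧ p.1 ≤ weeks then c.modify p.1 [] (fun cur => cur ++ p.2) else c) c)
    PySem.Dict.empty
  (PySem.List.sorted combined.keys (fun w => w) false).map (fun w => (w, combined.getD w []))

-- ===== PRECONDITION & SPEC =====
def Spec_combine_week_dicts (week_dicts : List (List (Int × List Int))) (weeks : Int) (out : List (Int × List Int)) : Prop := out = combine_week_dicts_alt week_dicts weeks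
instance (week_dicts : List (List (Int × List Int))) (weeks : Int) (out : List (Int × List Int)) : Decidable (Spec_combine_week_dicts week_dicts weeks out) := by unfold Spec_combine_week_dicts; infer_instance

-- ===== CLAIM (what is proved, stated in full; the proofs are below) =====
def Claim_equal_combine_week_dicts : Prop := ∀ (week_dicts : List (List (Int × List Int))) (weeks : Int), Dom_combine_week_dicts week_dicts weeks → Spec_combine_week_dicts week_dicts weeks (combine_week_dicts week_dicts weeks)

-- ===== LEMMAS AND PROOFS =====

-- concatenation of the values stored under week w across all dicts containing w
def pvVal (week_dicts : List (List (Int × List Int))) (w : Int) : List Int :=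
  week_dicts.flatMap (fun d =>
    if (PySem.Dict.mk d).contains w then (PySem.Dict.mk d).getD w [] else [])

-- the (zero or one) entry A's outer iteration for week w appends to the combined dict
def pvEntry (week_dicts : List (List (Int × List Int))) (w : Int) : List (Int × List Int) :=
  if week_dicts.any (fun d => (PySem.Dict.mk d).contains w) then [(w, pvVal week_dicts w)] else []

theorem pvVal_cons (d : List (Int × List Int)) (ds : List (List (Int × List Int))) (w : Int) :
    pvVal (d :: ds) w =
      (if (PySem.Dict.mk d).contains w then (PySem.Dict.mk d).getD w [] else []) ++ pvVal ds w := by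
  simp [pvVal]

-- once the combined dict ends in the entry for w (and no earlier entry has key w),
-- the rest of the inner loop just appends the remaining dicts' values for w to that entry
theorem pvInner_last (w : Int) (ds : List (List (Int × List Int))) :
    ∀ (base : List (Int × List Int)) (acc : List Int), (∀ p ∈ base, p.1 ≠ w) →
      ds.foldl (pvAStep w) (PySem.Dict.mk (base ++ [(w, acc)]))
        = PySem.Dict.mk (base ++ [(w, acc ++ pvVal ds w)]) := by
  induction ds with
  | nil => intro base acc _; simp [pvVal]
  | cons d ds ih =>
    intro base acc hbase
    by_cases hd : (PySem.Dict.mk d).contains w = true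
    · have hfind : (base ++ [(w, acc)]).find? (fun p => p.1 == w) = some (w, acc) := by
        rw [List.find?_append]
        have : base.find? (fun p => p.1 == w) = none := by
          rw [List.find?_eq_none]
          intro p hp
          simpa using hbase p hp
        simp [this]
      have hc : (PySem.Dict.mk (base ++ [(w, acc)])).contains w = true := by
        simp [PySem.Dict.contains, List.any_append]
      have hgd : (PySem.Dict.mk (base ++ [(w, acc)])).getD w [] = acc := by
        rw [PySem.Dict.getD_eq_get?_getD]
        simp [PySem.Dict.get?, hfind]
      have hstep : pvAStep w (PySem.Dict.mk (base ++ [(w, acc)])) d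
          = PySem.Dict.mk (base ++ [(w, acc ++ (PySem.Dict.mk d).getD w [])]) := by
        unfold pvAStep PySem.Dict.modify
        rw [if_pos hd, if_pos hc, hgd]
        apply PySem.Dict.ext
        rw [PySem.Dict.items_insert_of_contains _ _ hc]
        show (base ++ [(w, acc)]).map _ = _
        rw [List.map_append]
        congr 1
        · exact (List.map_congr_left (fun p hp => by
            have := hbase p hp; simp [this])).trans (List.map_id base)
        · simp
      rw [List.foldl_cons, hstep, ih base _ hbase, pvVal_cons, if_pos hd]
      simp
    · have hd' : (PySem.Dict.mk d).contains w = false := Bool.eq_false_iff.mpr hd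
      rw [List.foldl_cons]
      have hstep : pvAStep w (PySem.Dict.mk (base ++ [(w, acc)])) d
          = PySem.Dict.mk (base ++ [(w, acc)]) := by
        simp [pvAStep, hd']
      rw [hstep, ih base acc hbase, pvVal_cons, hd']
      simp

-- the whole inner loop for week w appends pvEntry to a dict not yet containing w
theorem pvInner (w : Int) (ds : List (List (Int × List Int))) (c : PySem.Dict Int (List Int))
    (hc : c.contains w = false) :
    ds.foldl (pvAStep w) c = PySem.Dict.mk (c.items ++ pvEntry ds w) := by
  have hbase : ∀ p ∈ c.items, p.1 ≠ w := by
    intro p hp hpw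
    have : c.contains w = true := by
      simp only [PySem.Dict.contains, List.any_eq_true]
      exact ⟨p, hp, by simp [hpw]⟩
    rw [this] at hc; cases hc
  induction ds with
  | nil =>
    have h0 : pvEntry [] w = [] := rfl
    rw [List.foldl_nil, h0, List.append_nil]
  | cons d ds ih =>
    by_cases hd : (PySem.Dict.mk d).contains w = true
    · have hgd : (c.insert w ([] : List Int)).getD w [] = [] := by
        rw [PySem.Dict.getD_eq_get?_getD, PySem.Dict.get?_insert_self]; rfl
      have hstep : pvAStep w c d
          = PySem.Dict.mk (c.items ++ [(w, (PySem.Dict.mk d).getD w [])]) := by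
        unfold pvAStep PySem.Dict.modify
        rw [if_pos hd, if_neg (by simp [hc]), hgd, PySem.Dict.insert_insert_self]
        apply PySem.Dict.ext
        rw [PySem.Dict.items_insert_of_not_contains _ _ hc]
        simp
      rw [List.foldl_cons, hstep, pvInner_last w ds c.items _ hbase,
        pvEntry, if_pos (by rw [List.any_cons, hd]; simp), pvVal_cons, if_pos hd]
    · have hd' : (PySem.Dict.mk d).contains w = false := Bool.eq_false_iff.mpr hd
      rw [List.foldl_cons]
      have hstep : pvAStep w c d = c := by simp [pvAStep, hd']
      rw [hstep, ih]
      rw [pvEntry, pvEntry, List.any_cons, pvVal_cons, hd', Bool.false_or]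
      simp

-- the outer loop over a duplicate-free list of fresh weeks appends the entries in order
theorem pvOuter (wds : List (List (Int × List Int))) (ws : List Int) :
    ∀ (c : PySem.Dict Int (List Int)), ws.Nodup → (∀ x ∈ ws, c.contains x = false) →
      (ws.foldl (fun c w => wds.foldl (pvAStep w) c) c).items
        = c.items ++ ws.flatMap (pvEntry wds) := by
  induction ws with
  | nil => intro c _ _; simp
  | cons w ws ih =>
    intro c hnd hfresh
    rw [List.foldl_cons, pvInner w wds c (hfresh w (by simp))]
    have hnd' : ws.Nodup := (List.nodup_cons.mp hnd).2
    have hwne : w ∉ ws := (List.nodup_cons.mp hnd).1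
    have hfresh' : ∀ x ∈ ws, (PySem.Dict.mk (c.items ++ pvEntry wds w)).contains x = false := by
      intro x hx
      have hxc := hfresh x (by simp [hx])
      simp only [PySem.Dict.contains, List.any_append, Bool.or_eq_false_iff]
      constructor
      · exact hxc
      · simp only [pvEntry]
        split
        · simp only [List.any_cons, List.any_nil, Bool.or_false]
          have : w ≠ x := fun h => hwne (h ▸ hx)
          simp [this]
        · rfl
    rw [ih _ hnd' hfresh']
    simp [List.flatMap_cons]

theorem pvFlatMap_entry (wds : List (List (Int × List Int))) (ws : List Int) :
    ws.flatMap (pvEntry wds)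
      = (ws.filter (fun w => wds.any (fun d => (PySem.Dict.mk d).contains w))).map
          (fun w => (w, pvVal wds w)) := by
  induction ws with
  | nil => rfl
  | cons w ws ih =>
    rw [List.flatMap_cons, ih]
    by_cases h : wds.any (fun d => (PySem.Dict.mk d).contains w) = true
    · rw [pvEntry, if_pos h, List.filter_cons, if_pos h, List.map_cons, List.singleton_append]
    · rw [pvEntry, if_neg h, List.filter_cons, if_neg h, List.nil_append]

-- B-side: the flattened, range-filtered entry stream B's nested loop processes
def pvL (wds : List (List (Int × List Int))) (weeks : Int) : List (Int × List Int) :=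
  wds.flatMap (fun d => (pvItems d).filter (fun p => decide (1 ≤ p.1 ∧ p.1 ≤ weeks)))

-- B's accumulator value at key w: the concatenation of all processed values keyed w
theorem pvGetD_fold (l : List (Int × List Int)) (c : PySem.Dict Int (List Int)) (w : Int) :
    (l.foldl (fun c p => c.modify p.1 [] (fun cur => cur ++ p.2)) c).getD w []
      = c.getD w [] ++ ((l.filter (fun p => p.1 == w)).map (·.2)).flatten := by
  induction l generalizing c with
  | nil => simp
  | cons p l ih =>
    rw [List.foldl_cons, ih, PySem.Dict.getD_modify, List.filter_cons]
    by_cases h : p.1 = w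
    · simp [h, List.append_assoc]
    · have h' : ¬ w = p.1 := fun e => h e.symm
      simp [h, h']

-- one dict's contribution to B's value at an in-range week w is A's contribution
theorem pvHead (d : List (Int × List Int)) (weeks w : Int) (h1 : 1 ≤ w) (h2 : w ≤ weeks) :
    ((((pvItems d).filter (fun p => decide (1 ≤ p.1 ∧ p.1 ≤ weeks))).filter
        (fun p => p.1 == w)).map (·.2)).flatten
      = if (PySem.Dict.mk d).contains w then (PySem.Dict.mk d).getD w [] else [] := by
  rw [List.filter_filter]
  have hpred : ((pvItems d).filter (fun p => p.1 == w && decide (1 ≤ p.1 ∧ p.1 ≤ weeks)))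
      = (pvItems d).filter (fun p => p.1 == w) := by
    apply List.filter_congr
    intro p _
    by_cases h : p.1 = w
    · simp [h, h1, h2]
    · simp [h]
  rw [hpred]
  unfold pvItems
  rw [List.filter_map]
  have : ((fun p : Int × List Int => p.1 == w) ∘ fun k => (k, (PySem.Dict.mk d).getD k []))
      = fun k => k == w := rfl
  rw [this, List.filter_beq]
  by_cases hm : w ∈ PySem.Set.ofList (d.map (·.1))
  · have hcnt : (PySem.Set.ofList (d.map (·.1))).count w = 1 :=
      List.count_eq_one_of_mem (PySem.Set.nodup_ofList _) hm
    have hcont : (PySem.Dict.mk d).contains w = true := by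
      rw [PySem.Dict.contains_iff_mem_keys]
      simpa [PySem.Set.mem_ofList, PySem.Dict.keys] using hm
    rw [hcnt, hcont]
    simp
  · have hcnt : (PySem.Set.ofList (d.map (·.1))).count w = 0 :=
      List.count_eq_zero.mpr hm
    have hcont : (PySem.Dict.mk d).contains w = false := by
      rw [Bool.eq_false_iff]
      intro hc
      exact hm (by simpa [PySem.Set.mem_ofList, PySem.Dict.keys] using
        (PySem.Dict.contains_iff_mem_keys _ _).mp hc)
    rw [hcnt, hcont]
    simp
  -- note: keys of Dict.mk d are d.map (·.1) definitionally

-- B's value at an in-range week w equals A's pvVal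
theorem pvVal_of_L (wds : List (List (Int × List Int))) (weeks w : Int)
    (h1 : 1 ≤ w) (h2 : w ≤ weeks) :
    (((pvL wds weeks).filter (fun p => p.1 == w)).map (·.2)).flatten = pvVal wds w := by
  induction wds with
  | nil => rfl
  | cons d wds ih =>
    rw [pvVal_cons, ← pvHead d weeks w h1 h2, ← ih]
    simp [pvL, List.flatMap_cons, List.filter_append]

-- B's key set is exactly the in-range weeks present in some dict
theorem pvMem_keys (wds : List (List (Int × List Int))) (weeks w : Int) :
    w ∈ (pvL wds weeks).map (·.1)
      ↔ (1 ≤ w ∧ w ≤ weeks ∧ wds.any (fun d => (PySem.Dict.mk d).contains w) = true) := by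
  simp only [pvL, List.map_flatMap, List.mem_flatMap, List.mem_map, List.mem_filter,
    List.any_eq_true, pvItems, decide_eq_true_eq]
  constructor
  · rintro ⟨d, hd, p, ⟨⟨k, hk, rfl⟩, hb1, hb2⟩, rfl⟩
    refine ⟨hb1, hb2, d, hd, ?_⟩
    rw [PySem.Dict.contains_iff_mem_keys]
    simpa [PySem.Set.mem_ofList, PySem.Dict.keys] using hk
  · rintro ⟨hb1, hb2, d, hd, hc⟩
    refine ⟨d, hd, (w, (PySem.Dict.mk d).getD w []), ⟨⟨w, ?_, rfl⟩, hb1, hb2⟩, rfl⟩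
    simpa [PySem.Set.mem_ofList, PySem.Dict.keys] using
      (PySem.Dict.contains_iff_mem_keys _ _).mp hc

-- B's nested loop is a single fold over the flattened entry stream pvL
theorem pvFold_eq (wds : List (List (Int × List Int))) (weeks : Int) (c : PySem.Dict Int (List Int)) :
    wds.foldl (fun c d =>
        (pvItems d).foldl (fun c p =>
          if 1 ≤ p.1 ∧ p.1 ≤ weeks then c.modify p.1 [] (fun cur => cur ++ p.2) else c) c) c
      = (pvL wds weeks).foldl (fun c p => c.modify p.1 [] (fun cur => cur ++ p.2)) c := by
  rw [pvL, List.foldl_flatMap]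
  apply PySem.List.foldl_congr_mem
  intro acc d _
  rw [PySem.List.foldl_ite_eq_foldl_filter]

-- B's accumulator, as a single fold
def pvF (wds : List (List (Int × List Int))) (weeks : Int) : PySem.Dict Int (List Int) :=
  (pvL wds weeks).foldl (fun c p => c.modify p.1 [] (fun cur => cur ++ p.2)) PySem.Dict.empty

theorem pvAlt_eq (wds : List (List (Int × List Int))) (weeks : Int) :
    combine_week_dicts_alt wds weeks
      = (PySem.List.sorted (pvF wds weeks).keys (fun w => w) false).map
          (fun w => (w, (pvF wds weeks).getD w [])) := by
  unfold combine_week_dicts_alt pvF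
  rw [pvFold_eq]

theorem pvKeys_F (wds : List (List (Int × List Int))) (weeks : Int) :
    (pvF wds weeks).keys = PySem.Set.ofList ((pvL wds weeks).map (·.1)) := by
  rw [pvF, PySem.Dict.keys_foldl_modify_key (key := fun p : Int × List Int => p.1)]
  simp [PySem.Set.update, PySem.Set.ofList_eq_foldl, PySem.Dict.keys_empty]

theorem pvSorted_keys (wds : List (List (Int × List Int))) (weeks : Int) :
    PySem.List.sorted (pvF wds weeks).keys (fun w => w) false
      = (PySem.List.pyRange 1 (weeks + 1) 1).filter
          (fun w => wds.any (fun d => (PySem.Dict.mk d).contains w)) := by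
  apply PySem.List.sorted_eq_of_perm_of_pairwise_lt
  · rw [pvKeys_F, List.perm_ext_iff_of_nodup
      ((PySem.List.nodup_pyRange_one 1 (weeks + 1)).filter _)
      (PySem.Set.nodup_ofList _)]
    intro x
    rw [PySem.Set.mem_ofList, pvMem_keys]
    simp only [List.mem_filter, PySem.List.mem_pyRange_one]
    constructor
    · rintro ⟨⟨h1, h2⟩, h3⟩; exact ⟨h1, by omega, h3⟩
    · rintro ⟨h1, h2, h3⟩; exact ⟨⟨h1, by omega⟩, h3⟩
  · exact (PySem.List.pairwise_lt_pyRange_one 1 (weeks + 1)).filter _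

-- ===== VERDICT (by name: the statement is the Claim_ definition above) =====
theorem combine_week_dicts_spec : Claim_equal_combine_week_dicts := by
  intro week_dicts weeks _
  show combine_week_dicts week_dicts weeks = combine_week_dicts_alt week_dicts weeks
  unfold combine_week_dicts
  rw [pvOuter week_dicts _ PySem.Dict.empty (PySem.List.nodup_pyRange_one 1 (weeks + 1))
      (fun x _ => PySem.Dict.contains_empty x),
    pvFlatMap_entry, pvAlt_eq, pvSorted_keys]
  rw [show PySem.Dict.empty.items = ([] : List (Int × List Int)) from rfl, List.nil_append]
  apply List.map_congr_left
  intro w hw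
  have hb := PySem.List.mem_pyRange_one.mp (List.mem_filter.mp hw).1
  rw [pvF, pvGetD_fold, PySem.Dict.getD_empty, List.nil_append,
    pvVal_of_L week_dicts weeks w hb.1 (by omega)]
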